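-- pv_equiv track=rewrite | github.com/liv-daliberti/kalshi | src/ingest/ws/ws_ingest_subscriptions.py | _build_remove_batches
-- ===== SOURCE A (Python) =====
-- def _build_remove_batches(
--     to_remove: list[str],
--     sid_tickers: dict[int, set[str]],
-- ) -> tuple[dict[int, list[str]], int]:
--     ticker_to_sid: dict[str, int] = {}
--     for sid, tickers in sid_tickers.items():
--         for ticker in tickers:
--             ticker_to_sid.setdefault(ticker, sid)
--     remove_by_sid: dict[int, list[str]] = {}
--     skipped = 0
--     for ticker in to_remove:
--         sid = ticker_to_sid.get(ticker)
--         if sid is None: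
--             skipped += 1
--             continue
--         remove_by_sid.setdefault(sid, []).append(ticker)
--     return remove_by_sid, skipped
-- ===== SOURCE B (Python) =====
-- def _first_sid(ticker, sid_tickers):
--     for sid, tickers in sid_tickers.items():
--         if ticker in tickers:
--             return sid
--     return None
--
--
-- def _build_remove_batches(
--     to_remove: list[str],
--     sid_tickers: dict[int, set[str]],
-- ) -> tuple[dict[int, list[str]], int]:
--     labeled = [(_first_sid(t, sid_tickers), t) for t in to_remove]
--     skipped = sum(1 for s, _ in labeled if s is None)
--     order = []
--     for s, _ in labeled:
--         if s is not None and s not in order: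
--             order.append(s)
--     return {s: [t for x, t in labeled if x == s] for s in order}, skipped
-- ===== Notes on version B (the rewrite author's own statement) =====
-- stated objective: alternative
-- what changed: Replaces A's two dict accumulations (a precomputed ticker->sid reverse index, then a setdefault/append loop into remove_by_sid) by staged passes: label each ticker with the first sid whose set contains it, count the unlabeled ones, dedup the sid labels in first-occurrence order, and build the result as a comprehension grouping labeled tickers per sid.
import Mathlib
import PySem

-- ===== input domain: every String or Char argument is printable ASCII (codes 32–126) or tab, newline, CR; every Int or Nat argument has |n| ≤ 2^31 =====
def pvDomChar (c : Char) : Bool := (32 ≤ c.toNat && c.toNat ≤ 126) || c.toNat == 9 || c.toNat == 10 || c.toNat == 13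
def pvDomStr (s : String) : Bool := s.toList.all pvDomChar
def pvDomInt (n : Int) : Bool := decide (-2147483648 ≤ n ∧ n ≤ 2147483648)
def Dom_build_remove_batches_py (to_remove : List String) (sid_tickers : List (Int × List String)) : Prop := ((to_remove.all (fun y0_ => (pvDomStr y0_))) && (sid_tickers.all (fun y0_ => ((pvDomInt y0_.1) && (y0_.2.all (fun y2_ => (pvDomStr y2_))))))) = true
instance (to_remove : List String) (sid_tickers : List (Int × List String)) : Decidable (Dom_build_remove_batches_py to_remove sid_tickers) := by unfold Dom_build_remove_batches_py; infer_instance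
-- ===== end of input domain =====

-- B replaces A's dict accumulations (reverse index + setdefault/append loop) by staged passes: label, count, dedup, group (alternative decomposition; same results).

-- ===== PORT A =====
-- ticker_to_sid built by the nested setdefault loop (only ever consumed via get?, so set iteration order cannot matter)
def pvT2S (sid_tickers : List (Int × List String)) : PySem.Dict String Int :=
  sid_tickers.foldl (fun d p => p.2.foldl (fun d t => d.setdefault t p.1) d) PySem.Dict.empty

def build_remove_batches_py (to_remove : List String) (sid_tickers : List (Int × List String)) : (List (Int × List String)) × Int :=
  let t2s := pvT2S sid_tickers
  let r := to_remove.foldl (fun (acc : PySem.Dict Int (List String) × Int) t =>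
    match t2s.get? t with
    | none => (acc.1, acc.2 + 1)
    | some sid => (acc.1.modify sid [] (· ++ [t]), acc.2)) (PySem.Dict.empty, 0)
  (r.1.items, r.2)

-- ===== PORT B =====
-- _first_sid: first sid in sid_tickers whose ticker set contains t, else None
def pvFirstSid (t : String) : List (Int × List String) → Option Int
  | [] => none
  | p :: rest => if PySem.Set.contains p.2 t then some p.1 else pvFirstSid t rest

def build_remove_batches_py_alt (to_remove : List String) (sid_tickers : List (Int × List String)) : (List (Int × List String)) × Int :=
  let labeled := to_remove.map (fun t => (pvFirstSid t sid_tickers, t))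
  let skipped : Int := ((labeled.filter (fun p => p.1 == none)).length : Int)
  let order : PySem.Set Int := labeled.foldl (fun o p =>
    match p.1 with
    | some s => PySem.Set.add o s
    | none => o) PySem.Set.empty
  (order.map (fun s => (s, (labeled.filter (fun p => p.1 == some s)).map (fun p => p.2))), skipped)

-- ===== PRECONDITION & SPEC =====
def Spec_build_remove_batches_py (to_remove : List String) (sid_tickers : List (Int × List String)) (out : (List (Int × List String)) × Int) : Prop := out = build_remove_batches_py_alt to_remove sid_tickers
instance (to_remove : List String) (sid_tickers : List (Int × List String)) (out : (List (Int × List String)) × Int) : Decidable (Spec_build_remove_batches_py to_remove sid_tickers out) := by unfold Spec_build_remove_batches_py; infer_instance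

-- ===== CLAIM =====
def Claim_equal_build_remove_batches_py : Prop := ∀ (to_remove : List String) (sid_tickers : List (Int × List String)), Dom_build_remove_batches_py to_remove sid_tickers → Spec_build_remove_batches_py to_remove sid_tickers (build_remove_batches_py to_remove sid_tickers)

-- ===== LEMMAS AND PROOFS =====

theorem get?_foldl_setdefault (s : Int) (x : String) :
    ∀ (l : List String) (d : PySem.Dict String Int),
      (l.foldl (fun d t => d.setdefault t s) d).get? x
        = (d.get? x).or (if x ∈ l then some s else none) := by
  intro l
  induction l with
  | nil => intro d; simp
  | cons a l ih =>
    intro d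
    simp only [List.foldl_cons, ih]
    by_cases hxa : x = a
    · subst hxa
      by_cases hc : d.contains x = true
      · rw [PySem.Dict.setdefault_of_contains _ _ hc]
        rcases h : d.get? x with _ | v
        · rw [PySem.Dict.get?_eq_none_iff_contains] at h; simp [h] at hc
        · simp
      · rw [PySem.Dict.setdefault_of_not_contains _ _ (by simpa using hc)]
        rw [PySem.Dict.get?_insert_self]
        have h : d.get? x = none := by
          rw [PySem.Dict.get?_eq_none_iff_contains]; simpa using hc
        simp [h]
    · have : (d.setdefault a s).get? x = d.get? x := by
        by_cases hc : d.contains a = true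
        · rw [PySem.Dict.setdefault_of_contains _ _ hc]
        · rw [PySem.Dict.setdefault_of_not_contains _ _ (by simpa using hc)]
          exact PySem.Dict.get?_insert_of_ne _ _ hxa
      rw [this]
      by_cases hm : x ∈ l
      · simp [hm, hxa]
      · simp [hm, hxa]

theorem get?_t2s_aux (x : String) :
    ∀ (l : List (Int × List String)) (d : PySem.Dict String Int),
      (l.foldl (fun d p => p.2.foldl (fun d t => d.setdefault t p.1) d) d).get? x
        = (d.get? x).or (pvFirstSid x l) := by
  intro l
  induction l with
  | nil => intro d; simp [pvFirstSid]
  | cons p l ih =>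
    intro d
    simp only [List.foldl_cons, ih, get?_foldl_setdefault, pvFirstSid]
    by_cases hm : x ∈ p.2
    · have hc : PySem.Set.contains p.2 x = true := by
        simp [PySem.Set.contains, hm]
      simp [hm]
    · have hc : PySem.Set.contains p.2 x = false := by
        simp [PySem.Set.contains, hm]
      simp [hm]

theorem get?_t2s (x : String) (l : List (Int × List String)) :
    (pvT2S l).get? x = pvFirstSid x l := by
  rw [pvT2S, get?_t2s_aux]; simp

-- A's consumer loop splits: the dict part is a modify-fold over the labeled pairs that have
-- a sid, and the counter adds one per unlabeled ticker.
theorem A_loop_split (st : List (Int × List String)) :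
    ∀ (l : List String) (d : PySem.Dict Int (List String)) (k : Int),
      l.foldl (fun (acc : PySem.Dict Int (List String) × Int) t =>
          match pvFirstSid t st with
          | none => (acc.1, acc.2 + 1)
          | some sid => (acc.1.modify sid [] (· ++ [t]), acc.2)) (d, k)
        = ((l.filterMap (fun t => (pvFirstSid t st).map (fun s => (s, t)))).foldl
             (fun d p => d.modify p.1 [] (· ++ [p.2])) d,
           k + (((l.map (fun t => (pvFirstSid t st, t))).filter (fun p => p.1 == none)).length : Int)) := by
  intro l
  induction l with
  | nil => intro d k; simp
  | cons t l ih =>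
    intro d k
    rcases h : pvFirstSid t st with _ | s
    · simp only [List.foldl_cons, List.filterMap_cons, List.map_cons, List.filter_cons, h]
      rw [ih]
      simp
      omega
    · simp only [List.foldl_cons, List.filterMap_cons, List.map_cons, List.filter_cons, h]
      rw [ih]
      simp

-- B's order loop is Set.add folded over the present labels.
theorem order_fold (q : List (Option Int × String)) :
    ∀ (o : PySem.Set Int),
      q.foldl (fun o p =>
          match p.1 with
          | some s => PySem.Set.add o s
          | none => o) o
        = (q.filterMap (fun p => p.1)).foldl PySem.Set.add o := by
  induction q with
  | nil => intro o; simp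
  | cons p q ih =>
    intro o
    rcases h : p.1 with _ | s <;> simp [h, ih]

-- grouping the sid-labeled pairs at key s = filtering the labeled list at label some s
theorem pairs_filter (st : List (Int × List String)) (s : Int) :
    ∀ (l : List String),
      ((l.filterMap (fun t => (pvFirstSid t st).map (fun x => (x, t)))).filter
          (fun p => p.1 == s)).map (fun p => p.2)
        = ((l.map (fun t => (pvFirstSid t st, t))).filter
            (fun p => p.1 == some s)).map (fun p => p.2) := by
  intro l
  induction l with
  | nil => simp
  | cons t l ih =>
    rcases h : pvFirstSid t st with _ | x
    · simp [h, ih]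
    · by_cases hx : x = s
      · subst hx; simp [h, ih]
      · simp [h, hx, ih]

-- the keys of the modify-fold are the labels deduped in order
theorem pairs_map_fst (st : List (Int × List String)) :
    ∀ (l : List String),
      (l.filterMap (fun t => (pvFirstSid t st).map (fun x => (x, t)))).map (fun p => p.1)
        = (l.map (fun t => (pvFirstSid t st, t))).filterMap (fun p => p.1) := by
  intro l
  induction l with
  | nil => simp
  | cons t l ih => rcases h : pvFirstSid t st with _ | x <;> simp [h, ih]

-- ===== VERDICT =====
theorem build_remove_batches_py_spec : Claim_equal_build_remove_batches_py := by
  intro to_remove st _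
  show build_remove_batches_py to_remove st = build_remove_batches_py_alt to_remove st
  unfold build_remove_batches_py build_remove_batches_py_alt
  simp only [get?_t2s]
  rw [A_loop_split]
  have hnd : ((to_remove.filterMap (fun t => (pvFirstSid t st).map (fun s => (s, t)))).foldl
      (fun d p => d.modify p.1 [] (· ++ [p.2])) PySem.Dict.empty).keys.Nodup := by
    exact PySem.Dict.nodup_keys_foldl_modify_key _ _ _ _ _ (by simp)
  rw [PySem.Dict.items_eq_map_keys _ hnd []]
  rw [PySem.Dict.keys_foldl_modify_key]
  simp only [PySem.Dict.getD_foldl_modify_append, PySem.Dict.getD_empty, List.nil_append]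
  rw [order_fold, pairs_map_fst]
  simp only [PySem.Dict.keys_empty]
  refine Prod.ext ?_ (by simp)
  show List.map _ _ = List.map _ _
  rw [show PySem.Set.update ([] : PySem.Set Int) = fun xs => List.foldl PySem.Set.add PySem.Set.empty xs from rfl]
  apply List.map_congr_left
  intro s _
  rw [pairs_filter]
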